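-- pv_equiv track=rewrite | github.com/hejh-ic-designer/npuperf | npuperf/classes/opt/hw_gen/hardware_modifier.py | modify_operational_dimension
-- ===== SOURCE A (Python) =====
-- def modify_operational_dimension(dimension_sizes: list[int], nb_macs_old, nb_macs_new) -> list[int]:
--     """根据给定的MACs信息配置原本的dimension sizes
--
--     这里给定的macs 不一定是原本的整数倍, 而且扩大的倍数也不确定要在哪个维度上增加, 所以先在check valid的时候把不是整数倍的情况抛错, 然后在这里把最小的dim扩大, 或把最大的dim 缩小
--
--     Args:
--         dimension_sizes (list[int]): 原本的dim list, 如 [8, 32, 2, 2]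
--         nb_macs_old (int): 原本的MAC数, 一定是上面size中各数的乘积
--         nb_macs_new (int): 用户给定的配置参数, 改变算力
--
--     Returns:
--         list[int]: 一个新的 dimension size, 数据格式相同
--     """
--     # 要扩大MACs
--     ds = dimension_sizes.copy()
--     if nb_macs_new > nb_macs_old:
--         times = int(nb_macs_new / nb_macs_old)
--         while times > 1:
--             id = ds.index(min(ds))
--             ds[id] *= 2
--             times /= 2
--     # 要缩小MACs
--     elif nb_macs_new < nb_macs_old:
--         times = int(nb_macs_old / nb_macs_new)
--         while times > 1:
--             id = ds.index(max(ds))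
--             ds[id] = int(ds[id] / 2)
--             times /= 2
--     else:
--         raise ValueError(nb_macs_old, nb_macs_new)
--     return ds
-- ===== SOURCE B (Python) =====
-- # Adjust dimension sizes to a new MAC count by repeatedly doubling the smallest /
-- # halving the largest dimension.  Keeps a (value, index)-sorted pair list (sorted
-- # once, then ordered re-inserts) and computes the number of doubling/halving steps
-- # up front via bit_length.
--
-- def _steps(ratio):
--     # number of doublings/halvings needed to cover an integer ratio
--     return (ratio - 1).bit_length() if ratio > 1 else 0
--
--
-- def _insert_sorted(p, pairs):
--     for k, q in enumerate(pairs):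
--         if p < q:
--             return pairs[:k] + [p] + pairs[k:]
--     return pairs + [p]
--
--
-- def modify_operational_dimension(dimension_sizes: list[int], nb_macs_old, nb_macs_new) -> list[int]:
--     n = len(dimension_sizes)
--     if nb_macs_new > nb_macs_old:
--         pairs = sorted((v, i) for i, v in enumerate(dimension_sizes))
--         for _ in range(_steps(int(nb_macs_new / nb_macs_old))):
--             (v, i), pairs = pairs[0], pairs[1:]
--             pairs = _insert_sorted((2 * v, i), pairs)
--         out = [0] * n
--         for v, i in pairs:
--             out[i] = v
--         return out
--     elif nb_macs_new < nb_macs_old: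
--         pairs = sorted((-v, i) for i, v in enumerate(dimension_sizes))
--         for _ in range(_steps(int(nb_macs_old / nb_macs_new))):
--             (nv, i), pairs = pairs[0], pairs[1:]
--             pairs = _insert_sorted((-int(-nv / 2), i), pairs)
--         out = [0] * n
--         for nv, i in pairs:
--             out[i] = -nv
--         return out
--     else:
--         raise ValueError(nb_macs_old, nb_macs_new)
-- ===== Notes on version B (the rewrite author's own statement) =====
-- stated objective: alternative
-- what changed: B replaces A's per-iteration min/max scan plus list.index over the list with a (value, index)-sorted pair list (sorted once, then pop-head/ordered-reinsert per step, scattered back by index), and computes the number of doublings/halvings once via bit_length instead of A's float-halving countdown; Pre_ excludes only the inputs where A raises (equal MAC counts, zero divisor, empty list with a running loop).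
-- outside the precondition, e.g. on modify_operational_dimension([8, 32, 2, 2], 1024, 1024): A raises ValueError, B raises ValueError; on modify_operational_dimension([8, 32], 0, 1024): A raises ZeroDivisionError, B raises ZeroDivisionError; on modify_operational_dimension([], 1024, 4096): A raises ValueError, B raises IndexError
import Mathlib
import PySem

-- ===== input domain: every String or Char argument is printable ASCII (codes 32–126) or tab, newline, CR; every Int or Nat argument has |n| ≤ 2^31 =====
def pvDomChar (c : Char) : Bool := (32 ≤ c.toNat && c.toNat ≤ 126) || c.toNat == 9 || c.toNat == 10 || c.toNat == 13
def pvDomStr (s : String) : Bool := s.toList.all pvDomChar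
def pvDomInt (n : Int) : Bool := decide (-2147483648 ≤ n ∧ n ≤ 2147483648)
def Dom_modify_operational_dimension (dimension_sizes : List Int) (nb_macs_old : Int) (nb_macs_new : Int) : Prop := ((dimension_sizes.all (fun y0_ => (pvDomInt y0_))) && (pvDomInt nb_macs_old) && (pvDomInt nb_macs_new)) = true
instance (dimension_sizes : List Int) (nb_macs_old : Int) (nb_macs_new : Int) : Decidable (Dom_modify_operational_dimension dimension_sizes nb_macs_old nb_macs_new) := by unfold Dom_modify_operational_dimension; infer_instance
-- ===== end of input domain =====

-- ===== PORT A =====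
-- B keeps a (value,index)-sorted pair list with ordered inserts instead of A's repeated
-- min/max scans + list.index; the float countdown `while times > 1: times /= 2` is replaced
-- by a bit_length count (objective: alternative).
-- Python's `int(x / y)` is float division then truncation; on Dom (|ints| ≤ 2^31 < 2^53)
-- the float quotient never rounds across an integer, so it equals Int.tdiv exactly.
-- `times /= 2` halves a float exactly, so after i halvings `times > 1` ⇔ t > 2^i; the loop
-- carries pow = 2^i. fuel = 64 only makes the recursion structural: on Dom t ≤ 2^31, so the
-- condition fails long before the fuel runs out and the loop is exact.
def pvWhileHalf (body : List Int → List Int) : Nat → Int → Int → List Int → List Int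
  | 0, _, _, ds => ds
  | fuel+1, t, pow, ds => if pow < t then pvWhileHalf body fuel t (2*pow) (body ds) else ds

-- loop body of the grow branch: id = ds.index(min(ds)); ds[id] *= 2
def pvGrowBody (ds : List Int) : List Int :=
  match PySem.List.min? ds (fun y => y) with
  | none => ds          -- min([]) raises ValueError: unreachable under Pre_
  | some m =>
    match PySem.List.index? ds m with
    | none => ds        -- unreachable: m ∈ ds
    | some i => ds.set i (ds.getD i 0 * 2)

-- loop body of the shrink branch: id = ds.index(max(ds)); ds[id] = int(ds[id] / 2)
def pvShrinkBody (ds : List Int) : List Int :=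
  match PySem.List.max? ds (fun y => y) with
  | none => ds          -- max([]) raises ValueError: unreachable under Pre_
  | some m =>
    match PySem.List.index? ds m with
    | none => ds        -- unreachable: m ∈ ds
    | some i => ds.set i (Int.tdiv (ds.getD i 0) 2)

def modify_operational_dimension (dimension_sizes : List Int) (nb_macs_old : Int) (nb_macs_new : Int) : List Int :=
  if nb_macs_new > nb_macs_old then
    pvWhileHalf pvGrowBody 64 (Int.tdiv nb_macs_new nb_macs_old) 1 dimension_sizes
  else if nb_macs_new < nb_macs_old then
    pvWhileHalf pvShrinkBody 64 (Int.tdiv nb_macs_old nb_macs_new) 1 dimension_sizes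
  else dimension_sizes  -- Python: raise ValueError — excluded by Pre_

-- ===== PORT B =====
-- _steps(ratio): (ratio - 1).bit_length() if ratio > 1 else 0   (bit_length n = log2 n + 1 for n ≥ 1)
def pvSteps (t : Int) : Nat :=
  if 1 < t then Nat.log2 (t - 1).toNat + 1 else 0

-- _insert_sorted(p, pairs): insert p before the first strictly greater pair (lex order)
def pvInsSorted (p : Int × Nat) : List (Int × Nat) → List (Int × Nat)
  | [] => [p]
  | q :: qs => if p.1 < q.1 ∨ (p.1 = q.1 ∧ p.2 < q.2) then p :: q :: qs else q :: pvInsSorted p qs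

-- pairs = sorted((g(v), i) for i, v in enumerate(ds))   (builtin sorted ≈ mergeSort, lex order)
def pvBuild (g : Int → Int) (ds : List Int) : List (Int × Nat) :=
  (ds.zipIdx.map (fun vi => (g vi.1, vi.2))).mergeSort
    (fun p q => decide (p.1 < q.1 ∨ (p.1 = q.1 ∧ p.2 ≤ q.2)))

-- (v, i), pairs = pairs[0], pairs[1:]; pairs = _insert_sorted((f(v), i), pairs)
def pvStep (f : Int → Int) (ps : List (Int × Nat)) : List (Int × Nat) :=
  match ps with
  | [] => []            -- pairs[0] raises IndexError: unreachable under Pre_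
  | p :: rest => pvInsSorted (f p.1, p.2) rest

-- out = [0] * n; for v, i in pairs: out[i] = r(v)
def pvScatter (r : Int → Int) (n : Nat) (ps : List (Int × Nat)) : List Int :=
  ps.foldl (fun out p => out.set p.2 (r p.1)) (List.replicate n 0)

-- int(x / y) → Int.tdiv, exact on Dom (see the comment above PORT A)
def modify_operational_dimension_alt (dimension_sizes : List Int) (nb_macs_old : Int) (nb_macs_new : Int) : List Int :=
  let n := dimension_sizes.length
  if nb_macs_new > nb_macs_old then
    pvScatter (fun v => v) n
      ((pvStep (fun v => 2 * v))^[pvSteps (Int.tdiv nb_macs_new nb_macs_old)]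
        (pvBuild (fun v => v) dimension_sizes))
  else if nb_macs_new < nb_macs_old then
    pvScatter (fun v => -v) n
      ((pvStep (fun nv => -(Int.tdiv (-nv) 2)))^[pvSteps (Int.tdiv nb_macs_old nb_macs_new)]
        (pvBuild (fun v => -v) dimension_sizes))
  else dimension_sizes  -- raise ValueError — excluded by Pre_

-- ===== PRECONDITION & SPEC =====
-- Pre_ excludes exactly the inputs where Python A raises: nb_macs_new == nb_macs_old
-- (explicit ValueError), a zero divisor in int(new/old) resp. int(old/new)
-- (ZeroDivisionError), and an empty dimension list when the loop would run at least once
-- (min()/max() of an empty list, ValueError). B raises on the same inputs.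
def Pre_modify_operational_dimension (dimension_sizes : List Int) (nb_macs_old : Int) (nb_macs_new : Int) : Prop :=
  nb_macs_old ≠ nb_macs_new ∧
  (nb_macs_old < nb_macs_new → nb_macs_old ≠ 0 ∧ (dimension_sizes ≠ [] ∨ Int.tdiv nb_macs_new nb_macs_old ≤ 1)) ∧
  (nb_macs_new < nb_macs_old → nb_macs_new ≠ 0 ∧ (dimension_sizes ≠ [] ∨ Int.tdiv nb_macs_old nb_macs_new ≤ 1))
instance (dimension_sizes : List Int) (nb_macs_old : Int) (nb_macs_new : Int) : Decidable (Pre_modify_operational_dimension dimension_sizes nb_macs_old nb_macs_new) := by unfold Pre_modify_operational_dimension; infer_instance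

def pvWitness_modify_operational_dimension : List Int × Int × Int := ([8, 32, 2, 2], 1024, 2048)

def Spec_modify_operational_dimension (dimension_sizes : List Int) (nb_macs_old : Int) (nb_macs_new : Int) (out : List Int) : Prop := out = modify_operational_dimension_alt dimension_sizes nb_macs_old nb_macs_new
instance (dimension_sizes : List Int) (nb_macs_old : Int) (nb_macs_new : Int) (out : List Int) : Decidable (Spec_modify_operational_dimension dimension_sizes nb_macs_old nb_macs_new out) := by unfold Spec_modify_operational_dimension; infer_instance

-- ===== CLAIM (what is proved, stated in full; the proofs are below) =====
def Claim_equal_modify_operational_dimension : Prop := ∀ (dimension_sizes : List Int) (nb_macs_old : Int) (nb_macs_new : Int), Dom_modify_operational_dimension dimension_sizes nb_macs_old nb_macs_new → Pre_modify_operational_dimension dimension_sizes nb_macs_old nb_macs_new → Spec_modify_operational_dimension dimension_sizes nb_macs_old nb_macs_new (modify_operational_dimension dimension_sizes nb_macs_old nb_macs_new)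

-- ===== LEMMAS AND PROOFS =====

-- lexicographic ≤ on (value, index) pairs
def pvPle (p q : Int × Nat) : Prop := p.1 < q.1 ∨ (p.1 = q.1 ∧ p.2 ≤ q.2)

-- the multiset of (g-relabelled value, index) pairs of a list
def pvPairs (g : Int → Int) (ds : List Int) : List (Int × Nat) :=
  ds.zipIdx.map (fun vi => (g vi.1, vi.2))

-- loop invariant tying B's pair list to A's current list
def pvInv (g : Int → Int) (ds : List Int) (ps : List (Int × Nat)) : Prop :=
  List.Pairwise pvPle ps ∧ ps.Perm (pvPairs g ds)

theorem pvPle_of_lt {p q : Int × Nat} (h : p.1 < q.1 ∨ (p.1 = q.1 ∧ p.2 < q.2)) : pvPle p q := by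
  unfold pvPle; omega

theorem pvPle_of_not_lt {p q : Int × Nat} (h : ¬(p.1 < q.1 ∨ (p.1 = q.1 ∧ p.2 < q.2))) : pvPle q p := by
  unfold pvPle; omega

theorem pvPle_trans {p q r : Int × Nat} (h1 : pvPle p q) (h2 : pvPle q r) : pvPle p r := by
  unfold pvPle at *; omega

theorem pvInsSorted_perm (p : Int × Nat) (l : List (Int × Nat)) : (pvInsSorted p l).Perm (p :: l) := by
  induction l with
  | nil => simp [pvInsSorted]
  | cons q qs ih =>
    by_cases h : p.1 < q.1 ∨ (p.1 = q.1 ∧ p.2 < q.2)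
    · simp [pvInsSorted, h]
    · simp only [pvInsSorted, if_neg h]
      exact (ih.cons q).trans (List.Perm.swap p q qs)

theorem pvInsSorted_pairwise (p : Int × Nat) (l : List (Int × Nat))
    (h : List.Pairwise pvPle l) : List.Pairwise pvPle (pvInsSorted p l) := by
  induction l with
  | nil => simp [pvInsSorted]
  | cons q qs ih =>
    rcases List.pairwise_cons.mp h with ⟨hq, hqs⟩
    by_cases hlt : p.1 < q.1 ∨ (p.1 = q.1 ∧ p.2 < q.2)
    · simp only [pvInsSorted, if_pos hlt]
      refine List.Pairwise.cons ?_ (List.Pairwise.cons hq hqs)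
      intro x hx
      rcases List.mem_cons.mp hx with rfl | hx
      · exact pvPle_of_lt hlt
      · exact pvPle_trans (pvPle_of_lt hlt) (hq x hx)
    · simp only [pvInsSorted, if_neg hlt]
      refine List.Pairwise.cons ?_ (ih hqs)
      intro x hx
      rcases List.mem_cons.mp ((pvInsSorted_perm p qs).mem_iff.mp hx) with rfl | hx'
      · exact pvPle_of_not_lt hlt
      · exact hq x hx'

theorem pvWhileHalf_eq_iterate (body : List Int → List Int) :
    ∀ (fuel : Nat) (t pow : Int) (k : Nat) (ds : List Int), 0 < pow →
      t ≤ 2 ^ fuel * pow → t ≤ 2 ^ k * pow → (∀ j : Nat, t ≤ 2 ^ j * pow → k ≤ j) →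
      pvWhileHalf body fuel t pow ds = body^[k] ds := by
  intro fuel
  induction fuel with
  | zero =>
    intro t pow k ds hpow hfuel _ hmin
    have hk : k ≤ 0 := hmin 0 (by simpa using hfuel)
    interval_cases k
    simp [pvWhileHalf]
  | succ fuel ih =>
    intro t pow k ds hpow hfuel hk hmin
    by_cases hcond : pow < t
    · cases k with
      | zero => simp only [pow_zero, one_mul] at hk; omega
      | succ k' =>
        simp only [pvWhileHalf, if_pos hcond]
        rw [Function.iterate_succ_apply]
        apply ih t (2 * pow) k' (body ds) (by omega)
        · calc t ≤ 2 ^ (fuel + 1) * pow := hfuel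
            _ = 2 ^ fuel * (2 * pow) := by ring
        · calc t ≤ 2 ^ (k' + 1) * pow := hk
            _ = 2 ^ k' * (2 * pow) := by ring
        · intro j hj
          have : t ≤ 2 ^ (j + 1) * pow := by
            calc t ≤ 2 ^ j * (2 * pow) := hj
              _ = 2 ^ (j + 1) * pow := by ring
          have := hmin (j + 1) this
          omega
    · have hk0 : k ≤ 0 := hmin 0 (by simpa using (by omega : t ≤ pow))
      interval_cases k
      simp [pvWhileHalf, hcond]

theorem pvSteps_le (t : Int) : t ≤ 2 ^ (pvSteps t) := by
  unfold pvSteps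
  split
  · rename_i h
    set L := Nat.log2 (t - 1).toNat with hL
    have h1 : (t - 1).toNat < 2 ^ (L + 1) := Nat.lt_log2_self
    have h2 : ((t - 1).toNat : Int) < ((2 ^ (L + 1) : Nat) : Int) := by exact_mod_cast h1
    have h3 : ((t - 1).toNat : Int) = t - 1 := Int.toNat_of_nonneg (by omega)
    push_cast at h2
    omega
  · rename_i h
    simp only [pow_zero]
    omega

theorem pvSteps_min (t : Int) (j : Nat) (h : t ≤ 2 ^ j) : pvSteps t ≤ j := by
  unfold pvSteps
  split
  · rename_i h1
    by_contra hcon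
    push_neg at hcon
    set L := Nat.log2 (t - 1).toNat with hL
    have hj : j ≤ L := by omega
    have h2 : (2 : Nat) ^ L ≤ (t - 1).toNat := Nat.log2_self_le (by omega)
    have h3 : (2 : Nat) ^ j ≤ 2 ^ L := Nat.pow_le_pow_right (by omega) hj
    have h4 : ((2 : Nat) ^ j : Int) ≤ ((2 ^ L : Nat) : Int) := by exact_mod_cast h3
    have h5 : (((t - 1).toNat : Nat) : Int) = t - 1 := Int.toNat_of_nonneg (by omega)
    have h6 : ((2 ^ L : Nat) : Int) ≤ t - 1 := by
      rw [← h5]; exact_mod_cast h2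
    push_cast at h4 h6
    omega
  · omega

theorem pvTdiv_le_pow64 (a b : Int) (ha : -2147483648 ≤ a ∧ a ≤ 2147483648) :
    Int.tdiv a b ≤ 2 ^ (64 : Nat) * 1 := by
  have h1 : (Int.tdiv a b).natAbs = a.natAbs / b.natAbs := Int.natAbs_tdiv a b
  have h2 : Int.tdiv a b ≤ ((Int.tdiv a b).natAbs : Int) := Int.le_natAbs
  have h3 : (Int.tdiv a b).natAbs ≤ a.natAbs := h1 ▸ Nat.div_le_self _ _
  have h4 : a.natAbs ≤ 2147483648 := by omega
  have h5 : ((2 : Int) ^ (64 : Nat) * 1) = 18446744073709551616 := by norm_num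
  omega

theorem length_pvPairs (g : Int → Int) (ds : List Int) : (pvPairs g ds).length = ds.length := by
  simp [pvPairs]

theorem getElem_pvPairs (g : Int → Int) (ds : List Int) (i : Nat) (h : i < ds.length) :
    (pvPairs g ds)[i]'(by simpa [length_pvPairs] using h) = (g ds[i], i) := by
  simp [pvPairs, List.getElem_zipIdx]

theorem mem_pvPairs (g : Int → Int) (ds : List Int) (x : Int × Nat) :
    x ∈ pvPairs g ds ↔ ∃ (j : Nat) (h : j < ds.length), x = (g ds[j], j) := by
  constructor
  · intro hx
    obtain ⟨⟨v, i⟩, hmem, rfl⟩ := List.mem_map.mp hx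
    obtain ⟨_, hilt, hv⟩ := List.mem_zipIdx hmem
    refine ⟨i, by omega, ?_⟩
    simp at hv
    simp [hv]
  · rintro ⟨j, hj, rfl⟩
    apply List.mem_map.mpr
    refine ⟨(ds[j], j), ?_, rfl⟩
    have h := List.getElem_zipIdx (l := ds) (j := 0) (i := j)
      (by simpa [List.length_zipIdx] using hj)
    rw [show (0 + j) = j from by omega] at h
    exact h ▸ List.getElem_mem _

theorem pvPairs_set (g : Int → Int) (ds : List Int) (j : Nat) (w : Int) (h : j < ds.length) :
    pvPairs g (ds.set j w) = (pvPairs g ds).set j (g w, j) := by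
  apply List.ext_getElem
  · simp [length_pvPairs, List.length_set]
  · intro i h1 h2
    have hi : i < ds.length := by simpa [length_pvPairs, List.length_set] using h1
    rw [getElem_pvPairs g (ds.set j w) i (by simpa [List.length_set] using hi)]
    simp only [List.getElem_set]
    by_cases hij : j = i
    · subst hij
      simp
    · simp only [if_neg hij]
      rw [getElem_pvPairs g ds i hi]

theorem perm_set_cons_eraseIdx {α : Type} (l : List α) (i : Nat) (a : α) (h : i < l.length) :
    (l.set i a).Perm (a :: l.eraseIdx i) := by
  induction l generalizing i with
  | nil => simp at h
  | cons x xs ih =>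
    cases i with
    | zero => simp
    | succ i =>
      simp only [List.set_cons_succ, List.eraseIdx_cons_succ]
      exact ((ih i (by simpa using h)).cons x).trans (List.Perm.swap a x _)

theorem perm_cons_eraseIdx {α : Type} (l : List α) (i : Nat) (h : i < l.length) :
    l.Perm (l[i] :: l.eraseIdx i) := by
  induction l generalizing i with
  | nil => simp at h
  | cons x xs ih =>
    cases i with
    | zero => simp
    | succ i =>
      simp only [List.getElem_cons_succ, List.eraseIdx_cons_succ]
      exact ((ih i (by simpa using h)).cons x).trans (List.Perm.swap _ x _)

theorem pvHead_eq (g : Int → Int) (ds : List Int) (p : Int × Nat) (rest : List (Int × Nat))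
    (hsorted : List.Pairwise pvPle (p :: rest)) (hperm : (p :: rest).Perm (pvPairs g ds))
    (i0 : Nat) (hi0 : i0 < ds.length)
    (hmin : ∀ (k : Nat) (hk : k < ds.length), g ds[i0] ≤ g ds[k])
    (hfirst : ∀ (k : Nat) (hk : k < i0), g ds[k] ≠ g ds[i0]) :
    p = (g ds[i0], i0) := by
  have hpmem : p ∈ pvPairs g ds := hperm.subset (List.mem_cons_self)
  obtain ⟨j, hj, hpj⟩ := (mem_pvPairs g ds p).mp hpmem
  have htmem : (g ds[i0], i0) ∈ p :: rest :=
    hperm.symm.subset ((mem_pvPairs g ds _).mpr ⟨i0, hi0, rfl⟩)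
  rcases List.mem_cons.mp htmem with heq | hmem
  · exact heq.symm
  · have hple : pvPle p (g ds[i0], i0) := (List.pairwise_cons.mp hsorted).1 _ hmem
    rw [hpj] at hple ⊢
    unfold pvPle at hple
    simp only at hple
    have h1 := hmin j hj
    rcases hple with hlt | ⟨heq, hle⟩
    · omega
    · have hj0 : j = i0 := by
        rcases Nat.lt_or_ge j i0 with hlt' | hge
        · exact absurd heq (hfirst j hlt')
        · omega
      subst hj0; rfl

theorem pvStep_core (g : Int → Int) (u : Int) (ds : List Int) (i0 : Nat) (hi0 : i0 < ds.length)
    (p : Int × Nat) (rest : List (Int × Nat))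
    (hsorted : List.Pairwise pvPle (p :: rest)) (hperm : (p :: rest).Perm (pvPairs g ds))
    (hmin : ∀ (k : Nat) (hk : k < ds.length), g ds[i0] ≤ g ds[k])
    (hfirst : ∀ (k : Nat) (hk : k < i0), g ds[k] ≠ g ds[i0]) :
    p = (g ds[i0], i0) ∧ pvInv g (ds.set i0 u) (pvInsSorted (g u, i0) rest) := by
  have hp := pvHead_eq g ds p rest hsorted hperm i0 hi0 hmin hfirst
  refine ⟨hp, ?_, ?_⟩
  · exact pvInsSorted_pairwise _ _ (List.pairwise_cons.mp hsorted).2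
  · have hi0' : i0 < (pvPairs g ds).length := by simpa [length_pvPairs] using hi0
    have hP : (pvPairs g ds)[i0]'hi0' = (g ds[i0], i0) := getElem_pvPairs g ds i0 hi0
    have h1 : (pvPairs g ds).Perm ((g ds[i0], i0) :: (pvPairs g ds).eraseIdx i0) := by
      have := perm_cons_eraseIdx (pvPairs g ds) i0 hi0'
      rwa [hP] at this
    have h2 : rest.Perm ((pvPairs g ds).eraseIdx i0) := by
      have := hperm.trans h1
      rw [hp] at this
      exact this.cons_inv
    have h3 : pvPairs g (ds.set i0 u) = (pvPairs g ds).set i0 (g u, i0) :=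
      pvPairs_set g ds i0 u hi0
    have h4 : ((pvPairs g ds).set i0 (g u, i0)).Perm ((g u, i0) :: (pvPairs g ds).eraseIdx i0) :=
      perm_set_cons_eraseIdx _ i0 _ hi0'
    rw [h3]
    exact (pvInsSorted_perm _ _).trans ((h2.cons _).trans h4.symm)

theorem pvBuild_inv (g : Int → Int) (ds : List Int) : pvInv g ds (pvBuild g ds) := by
  constructor
  · have h := List.pairwise_mergeSort
      (le := fun p q : Int × Nat => decide (p.1 < q.1 ∨ (p.1 = q.1 ∧ p.2 ≤ q.2)))
      (by intro a b c hab hbc; simp only [decide_eq_true_eq] at *; omega)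
      (by intro a b; simp only [Bool.or_eq_true, decide_eq_true_eq]; omega)
      (ds.zipIdx.map (fun vi => (g vi.1, vi.2)))
    refine (List.Pairwise.imp ?_ h)
    intro a b hab
    simp only [decide_eq_true_eq] at hab
    exact hab
  · exact List.mergeSort_perm _ _

theorem pvFoldlSet_getElem?_of_not_mem (r : Int → Int) :
    ∀ (ps : List (Int × Nat)) (acc : List Int) (j : Nat), (∀ q ∈ ps, q.2 ≠ j) →
      (ps.foldl (fun out p => out.set p.2 (r p.1)) acc)[j]? = acc[j]? := by
  intro ps
  induction ps with
  | nil => intro acc j _; rfl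
  | cons p ps ih =>
    intro acc j hj
    rw [List.foldl_cons, ih _ j (fun q hq => hj q (List.mem_cons_of_mem _ hq))]
    rw [List.getElem?_set]
    simp [hj p List.mem_cons_self]

theorem pvFoldlSet_getElem? (r : Int → Int) :
    ∀ (ps : List (Int × Nat)) (acc : List Int) (v : Int) (j : Nat), (v, j) ∈ ps →
      List.Pairwise (fun a b : Int × Nat => a.2 ≠ b.2) ps → j < acc.length →
      (ps.foldl (fun out p => out.set p.2 (r p.1)) acc)[j]? = some (r v) := by
  intro ps
  induction ps with
  | nil => intro acc v j h; simp at h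
  | cons p ps ih =>
    intro acc v j hmem hpair hj
    rcases List.pairwise_cons.mp hpair with ⟨hhd, htl⟩
    rcases List.mem_cons.mp hmem with heq | hmem'
    · have hpj : p.2 = j := by rw [← heq]
      have hpv : p.1 = v := by rw [← heq]
      rw [List.foldl_cons]
      rw [pvFoldlSet_getElem?_of_not_mem r ps _ j (fun q hq hc => (hhd q hq) (by omega))]
      rw [hpj, hpv]
      simp [List.getElem?_set, hj]
    · rw [List.foldl_cons]
      exact ih _ v j hmem' htl (by rw [List.length_set]; exact hj)

theorem pvPairs_snd_pairwise (g : Int → Int) (ds : List Int) :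
    List.Pairwise (fun a b : Int × Nat => a.2 ≠ b.2) (pvPairs g ds) := by
  apply List.pairwise_iff_getElem.mpr
  intro i j hi hj hij
  have hi' : i < ds.length := by simpa [length_pvPairs] using hi
  have hj' : j < ds.length := by simpa [length_pvPairs] using hj
  rw [getElem_pvPairs g ds i hi', getElem_pvPairs g ds j hj']
  simpa using Nat.ne_of_lt hij

theorem pvScatter_eq (g r : Int → Int) (ds : List Int) (ps : List (Int × Nat))
    (hinv : pvInv g ds ps) (hr : ∀ v : Int, r (g v) = v) :
    pvScatter r ds.length ps = ds := by
  obtain ⟨_, hperm⟩ := hinv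
  have hsnd : List.Pairwise (fun a b : Int × Nat => a.2 ≠ b.2) ps :=
    (List.Perm.pairwise_iff (fun h hc => h hc.symm) hperm).mpr
      (pvPairs_snd_pairwise g ds)
  apply List.ext_getElem?
  intro j
  unfold pvScatter
  by_cases hj : j < ds.length
  · have hmem : ((g ds[j] : Int), j) ∈ ps :=
      hperm.symm.subset ((mem_pvPairs g ds _).mpr ⟨j, hj, rfl⟩)
    rw [pvFoldlSet_getElem? r ps _ (g ds[j]) j hmem hsnd (by simpa using hj)]
    rw [hr, List.getElem?_eq_getElem hj]
  · rw [pvFoldlSet_getElem?_of_not_mem r ps _ j]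
    · simp [List.getElem?_eq_none, hj, not_lt.mp hj]
    · intro q hq
      obtain ⟨k, hk, hqk⟩ := (mem_pvPairs g ds q).mp (hperm.subset hq)
      rw [hqk]
      simp only
      omega

theorem pvGrow_step (ds : List Int) (ps : List (Int × Nat)) (hne : ds ≠ [])
    (hinv : pvInv (fun v => v) ds ps) :
    pvInv (fun v => v) (pvGrowBody ds) (pvStep (fun v => 2 * v) ps) ∧ (pvGrowBody ds).length = ds.length := by
  obtain ⟨hsort, hperm⟩ := hinv
  obtain ⟨m, hm⟩ : ∃ m, PySem.List.min? ds (fun y => y) = some m := by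
    cases h : PySem.List.min? ds (fun y => y) with
    | none => exact absurd ((PySem.List.min?_eq_none_iff _ _).mp h) hne
    | some m => exact ⟨m, rfl⟩
  have hmem := PySem.List.min?_mem hm
  have hisMin := PySem.List.min?_isMin hm
  obtain ⟨i0, hidx⟩ : ∃ i0, PySem.List.index? ds m = some i0 := by
    have hs := (PySem.List.index?_isSome_iff ds m).mpr hmem
    cases h : PySem.List.index? ds m with
    | none => rw [h] at hs; simp at hs
    | some i => exact ⟨i, rfl⟩
  obtain ⟨hi0, hval, hfirst⟩ := PySem.List.getElem_of_index?_eq_some hidx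
  have hbody : pvGrowBody ds = ds.set i0 (ds[i0] * 2) := by
    unfold pvGrowBody
    simp only [hm, hidx]
    rw [List.getD_eq_getElem ds 0 hi0]
  obtain ⟨p, rest, rfl⟩ : ∃ p rest, ps = p :: rest := by
    cases ps with
    | nil =>
      have := hperm.length_eq
      simp [length_pvPairs] at this
      exact absurd this.symm (by simpa using hne)
    | cons p rest => exact ⟨p, rest, rfl⟩
  have hmin' : ∀ (k : Nat) (hk : k < ds.length), (fun v => v) ds[i0] ≤ (fun v => v) ds[k] := by
    intro k hk
    simpa [hval] using hisMin ds[k] (List.getElem_mem hk)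
  have hfirst' : ∀ (k : Nat) (hk : k < i0), (fun v => v) ds[k] ≠ (fun v => v) ds[i0] := by
    intro k hk
    simpa [hval] using hfirst k hk
  obtain ⟨hp, hinv'⟩ := pvStep_core (fun v => v) (ds[i0] * 2) ds i0 hi0 p rest hsort hperm hmin' hfirst'
  constructor
  · rw [hbody]
    show pvInv _ _ (pvInsSorted (2 * p.1, p.2) rest)
    rw [hp]
    have hpair : ((2 * ds[i0] : Int), i0) = ((fun v => v) ((ds[i0] : Int) * 2), i0) := by
      simp [mul_comm]
    simpa [hpair] using hinv'
  · rw [hbody]; simp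

theorem pvShrink_step (ds : List Int) (ps : List (Int × Nat)) (hne : ds ≠ [])
    (hinv : pvInv (fun v => -v) ds ps) :
    pvInv (fun v => -v) (pvShrinkBody ds) (pvStep (fun nv => -(Int.tdiv (-nv) 2)) ps) ∧ (pvShrinkBody ds).length = ds.length := by
  obtain ⟨hsort, hperm⟩ := hinv
  obtain ⟨m, hm⟩ : ∃ m, PySem.List.max? ds (fun y => y) = some m := by
    cases h : PySem.List.max? ds (fun y => y) with
    | none => exact absurd ((PySem.List.max?_eq_none_iff _ _).mp h) hne
    | some m => exact ⟨m, rfl⟩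
  have hmem := PySem.List.max?_mem hm
  have hisMax := PySem.List.max?_isMax hm
  obtain ⟨i0, hidx⟩ : ∃ i0, PySem.List.index? ds m = some i0 := by
    have hs := (PySem.List.index?_isSome_iff ds m).mpr hmem
    cases h : PySem.List.index? ds m with
    | none => rw [h] at hs; simp at hs
    | some i => exact ⟨i, rfl⟩
  obtain ⟨hi0, hval, hfirst⟩ := PySem.List.getElem_of_index?_eq_some hidx
  have hbody : pvShrinkBody ds = ds.set i0 (Int.tdiv ds[i0] 2) := by
    unfold pvShrinkBody
    simp only [hm, hidx]
    rw [List.getD_eq_getElem ds 0 hi0]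
  obtain ⟨p, rest, rfl⟩ : ∃ p rest, ps = p :: rest := by
    cases ps with
    | nil =>
      have := hperm.length_eq
      simp [length_pvPairs] at this
      exact absurd this.symm (by simpa using hne)
    | cons p rest => exact ⟨p, rest, rfl⟩
  have hmin' : ∀ (k : Nat) (hk : k < ds.length), (fun v => -v) ds[i0] ≤ (fun v => -v) ds[k] := by
    intro k hk
    have := hisMax ds[k] (List.getElem_mem hk)
    simp only [hval] at this ⊢
    omega
  have hfirst' : ∀ (k : Nat) (hk : k < i0), (fun v => -v) ds[k] ≠ (fun v => -v) ds[i0] := by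
    intro k hk
    have := hfirst k hk
    simp only [hval] at this ⊢
    omega
  obtain ⟨hp, hinv'⟩ := pvStep_core (fun v => -v) (Int.tdiv ds[i0] 2) ds i0 hi0 p rest hsort hperm hmin' hfirst'
  constructor
  · rw [hbody]
    show pvInv _ _ (pvInsSorted (-(Int.tdiv (-p.1) 2), p.2) rest)
    rw [hp]
    simp only [neg_neg]
    exact hinv'
  · rw [hbody]; simp

theorem pvIter_inv (abody : List Int → List Int) (f g : Int → Int)
    (hstep : ∀ ds ps, ds ≠ [] → pvInv g ds ps → pvInv g (abody ds) (pvStep f ps) ∧ (abody ds).length = ds.length) :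
    ∀ (k : Nat) (ds : List Int) (ps : List (Int × Nat)), ds ≠ [] → pvInv g ds ps →
      pvInv g (abody^[k] ds) ((pvStep f)^[k] ps) ∧ (abody^[k] ds).length = ds.length := by
  intro k
  induction k with
  | zero => intro ds ps _ h; simpa using h
  | succ k ih =>
    intro ds ps hne hinv
    obtain ⟨hinv', hlen'⟩ := hstep ds ps hne hinv
    have hne' : abody ds ≠ [] := by
      intro hcon; rw [hcon] at hlen'; simp at hlen'
      exact hne (List.eq_nil_of_length_eq_zero hlen'.symm)
    rw [Function.iterate_succ_apply, Function.iterate_succ_apply]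
    obtain ⟨h1, h2⟩ := ih (abody ds) (pvStep f ps) hne' hinv'
    exact ⟨h1, by rw [h2, hlen']⟩

theorem pvBranch (abody : List Int → List Int) (f g r : Int → Int)
    (hstep : ∀ ds ps, ds ≠ [] → pvInv g ds ps → pvInv g (abody ds) (pvStep f ps) ∧ (abody ds).length = ds.length)
    (hr : ∀ v : Int, r (g v) = v)
    (ds : List Int) (t : Int) (ht64 : t ≤ 2 ^ (64 : Nat) * 1)
    (hok : ds ≠ [] ∨ t ≤ 1) :
    pvWhileHalf abody 64 t 1 ds =
      pvScatter r ds.length ((pvStep f)^[pvSteps t] (pvBuild g ds)) := by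
  have hA : pvWhileHalf abody 64 t 1 ds = abody^[pvSteps t] ds := by
    apply pvWhileHalf_eq_iterate abody 64 t 1 (pvSteps t) ds (by omega) ht64
    · simpa using pvSteps_le t
    · intro j hj
      exact pvSteps_min t j (by simpa using hj)
  rcases hok with hne | hsmall
  · rw [hA]
    obtain ⟨hinv, hlen⟩ := pvIter_inv abody f g hstep (pvSteps t) ds (pvBuild g ds) hne (pvBuild_inv g ds)
    have := pvScatter_eq g r (abody^[pvSteps t] ds) ((pvStep f)^[pvSteps t] (pvBuild g ds)) hinv hr
    rw [← hlen]
    exact this.symm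
  · have hk0 : pvSteps t = 0 := Nat.le_zero.mp (pvSteps_min t 0 (by simpa using hsmall))
    rw [hA, hk0]
    simp only [Function.iterate_zero, id]
    exact (pvScatter_eq g r ds (pvBuild g ds) (pvBuild_inv g ds) hr).symm

-- ===== VERDICT (by name: the statement is the Claim_ definition above) =====
theorem modify_operational_dimension_spec : Claim_equal_modify_operational_dimension := by
  unfold Claim_equal_modify_operational_dimension
  intro ds old new hdom hpre
  unfold Spec_modify_operational_dimension
  obtain ⟨hne, hgrowPre, hshrinkPre⟩ := hpre
  have hbounds : (-2147483648 ≤ new ∧ new ≤ 2147483648) ∧ (-2147483648 ≤ old ∧ old ≤ 2147483648) := by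
    unfold Dom_modify_operational_dimension pvDomInt at hdom
    simp only [Bool.and_eq_true, decide_eq_true_eq] at hdom
    exact ⟨hdom.2, hdom.1.2⟩
  unfold modify_operational_dimension modify_operational_dimension_alt
  by_cases h1 : new > old
  · obtain ⟨_, hok⟩ := hgrowPre h1
    simp only [if_pos h1]
    exact pvBranch pvGrowBody (fun v => 2 * v) (fun v => v) (fun v => v)
      pvGrow_step (fun v => rfl) ds (Int.tdiv new old)
      (pvTdiv_le_pow64 new old hbounds.1) hok
  · by_cases h2 : new < old
    · obtain ⟨_, hok⟩ := hshrinkPre h2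
      simp only [if_neg h1, if_pos h2]
      exact pvBranch pvShrinkBody (fun nv => -(Int.tdiv (-nv) 2)) (fun v => -v) (fun v => -v)
        pvShrink_step (fun v => by simp) ds (Int.tdiv old new)
        (pvTdiv_le_pow64 old new hbounds.2) hok
    · simp [if_neg h1, if_neg h2]
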